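-- pv_equiv track=rewrite | github.com/tsaihsilo/Word_Searcher | search.py | find_words
-- ===== SOURCE A (Python) =====
-- def find_words(keywords, key_dict):
--     intersect_docs = set()
--     gather_map = {}
--     keyword_len = len(keywords)
--
--     for key in keywords:
--         if key in key_dict.keys():
--             key_dict[key] = key_dict.get(key, set())
--
--             for idx in key_dict[key]:
--                 if idx in gather_map.keys():
--                     times = gather_map.get(idx)
--                     gather_map[idx] = times+ 1
--                 else:
--                     gather_map[idx] = gather_map.get(idx, 0) + 1
--
--                 if gather_map[idx] == keyword_len:
--                     intersect_docs.add(idx)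
--     return intersect_docs
-- ===== SOURCE B (Python) =====
-- def find_words(keywords, key_dict):
--     if not keywords or any(k not in key_dict for k in keywords):
--         return set()
--     *rest, last = keywords
--     common = set(key_dict[last])
--     for k in rest:
--         common = common & set(key_dict[k])
--     return common
-- ===== Notes on version B (the rewrite author's own statement) =====
-- stated objective: simpler
-- what changed: B replaces A's per-posting counting-to-threshold dict loop by a presence check followed by a direct set intersection of the keyword posting sets (C-level set ops instead of per-item dict updates).
-- outside the precondition, e.g. on find_words(['a', 'b'], {'a': [1, 1], 'b': []}): A returns {1}, B returns set()
import Mathlib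
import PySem

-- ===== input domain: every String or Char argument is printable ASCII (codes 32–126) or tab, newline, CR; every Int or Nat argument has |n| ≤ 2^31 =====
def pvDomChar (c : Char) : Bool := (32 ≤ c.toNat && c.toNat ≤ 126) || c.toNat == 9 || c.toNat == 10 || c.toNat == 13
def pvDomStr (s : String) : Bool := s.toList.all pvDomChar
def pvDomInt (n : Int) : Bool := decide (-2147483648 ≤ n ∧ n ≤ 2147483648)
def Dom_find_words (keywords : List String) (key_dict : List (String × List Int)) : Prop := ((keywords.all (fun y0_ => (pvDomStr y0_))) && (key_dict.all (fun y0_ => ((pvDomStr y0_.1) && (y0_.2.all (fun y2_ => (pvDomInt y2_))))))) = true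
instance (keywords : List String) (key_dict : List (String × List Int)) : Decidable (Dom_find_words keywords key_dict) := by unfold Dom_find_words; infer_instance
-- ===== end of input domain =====

-- B replaces A's per-posting counting-to-threshold dict loop by a presence check followed by a
-- direct set intersection of the keyword posting sets (objective: simpler).


-- ===== PORT A =====
-- inner loop of A: 'for idx in key_dict[key]: …' (threads intersect_docs and gather_map)
def pvAInner (n : Int) (l : List Int) (st0 : PySem.Set Int × PySem.Dict Int Int) :
    PySem.Set Int × PySem.Dict Int Int :=
  l.foldl (fun st idx =>
      let g := if st.2.contains idx then st.2.insert idx (st.2.getD idx 0 + 1)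
               else st.2.insert idx (st.2.getD idx 0 + 1)
      (if g.getD idx 0 = n then PySem.Set.add st.1 idx else st.1, g))
    st0

-- body of A's outer 'for key in keywords:' loop (threads intersect_docs, gather_map, key_dict)
def pvAStep (n : Int) (st : PySem.Set Int × PySem.Dict Int Int × PySem.Dict String (List Int))
    (key : String) : PySem.Set Int × PySem.Dict Int Int × PySem.Dict String (List Int) :=
  if st.2.2.contains key then
    let d := st.2.2.insert key (st.2.2.getD key [])      -- key_dict[key] = key_dict.get(key, set())
    let p := pvAInner n (d.getD key []) (st.1, st.2.1)
    (p.1, p.2, d)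
  else st

def find_words (keywords : List String) (key_dict : List (String × List Int)) : List Int :=
  (keywords.foldl (pvAStep ((keywords.length : Int)))
      (PySem.Set.empty, PySem.Dict.empty, PySem.Dict.ofList key_dict)).1

-- ===== PORT B =====
def find_words_alt (keywords : List String) (key_dict : List (String × List Int)) : List Int :=
  let d := PySem.Dict.ofList key_dict
  match keywords.getLast? with
  | none => PySem.Set.empty                               -- 'not keywords' → set()
  | some last =>
      if keywords.any (fun k => !(d.contains k)) then PySem.Set.empty   -- some keyword absent → set()
      else
        keywords.dropLast.foldl
          (fun common k => PySem.Set.inter common (PySem.Set.ofList (d.getD k [])))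
          (PySem.Set.ofList (d.getD last []))

-- ===== PRECONDITION & SPEC =====
-- A treats key_dict's values as posting SETS (it even defaults a missing entry to set()); Pre_ excludes
-- key_dicts in which some posting list contains a duplicate doc id, on which A's counter double-counts a
-- single keyword and can return docs that are not in every keyword's postings.
def Pre_find_words (keywords : List String) (key_dict : List (String × List Int)) : Prop :=
  ∀ p ∈ key_dict, p.2.Nodup
instance (keywords : List String) (key_dict : List (String × List Int)) : Decidable (Pre_find_words keywords key_dict) := by unfold Pre_find_words; infer_instance

def pvWitness_find_words : List String × (List (String × List Int)) :=
  (["cat", "dog"], [("cat", [1, 2, 3]), ("dog", [2, 3]), ("fish", [5])])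

def Spec_find_words (keywords : List String) (key_dict : List (String × List Int)) (out : List Int) : Prop := out = find_words_alt keywords key_dict
instance (keywords : List String) (key_dict : List (String × List Int)) (out : List Int) : Decidable (Spec_find_words keywords key_dict out) := by unfold Spec_find_words; infer_instance

-- ===== CLAIM (what is proved, stated in full; the proofs are below) =====
def Claim_equal_find_words : Prop := ∀ (keywords : List String) (key_dict : List (String × List Int)), Dom_find_words keywords key_dict → Pre_find_words keywords key_dict → Spec_find_words keywords key_dict (find_words keywords key_dict)

-- ===== LEMMAS AND PROOFS =====

-- number of keywords in ks that are present in d0 and whose posting list contains idx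
def pvCnt (d0 : PySem.Dict String (List Int)) (ks : List String) (idx : Int) : Nat :=
  ks.countP (fun k => d0.contains k && decide (idx ∈ d0.getD k []))

theorem pv_foldl_id (l : List Int) (S : PySem.Set Int) :
    l.foldl (fun S _ => S) S = S := by
  induction l <;> simp [*]

-- every item of (d.insert k v) is an item of d or carries the value v
theorem pv_mem_items_insert {κ ν : Type} [BEq κ] (d : PySem.Dict κ ν) (k : κ) (v : ν)
    (p : κ × ν) (hp : p ∈ (d.insert k v).items) : p ∈ d.items ∨ p.2 = v := by
  unfold PySem.Dict.insert at hp
  split at hp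
  · simp only [List.mem_map] at hp
    obtain ⟨q, hq, hqe⟩ := hp
    by_cases h : (q.1 == k) = true
    · right; simp [h] at hqe; simp [← hqe]
    · left; simpa [h, ← hqe] using hq
  · simp only [List.mem_append, List.mem_singleton] at hp
    rcases hp with h | h
    · left; exact h
    · right; simp [h]

-- a property of values is preserved through Dict.update
theorem pv_values_update {κ ν : Type} [BEq κ] (C : ν → Prop) :
    ∀ (l : List (κ × ν)) (d : PySem.Dict κ ν),
      (∀ p ∈ d.items, C p.2) → (∀ q ∈ l, C q.2) → ∀ p ∈ (d.update l).items, C p.2 := by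
  intro l
  induction l with
  | nil => intro d hd _ p hp; exact hd p hp
  | cons q rest ih =>
    intro d hd hl p hp
    have he : PySem.Dict.update d (q :: rest) = PySem.Dict.update (d.insert q.1 q.2) rest := rfl
    rw [he] at hp
    refine ih _ ?_ (fun r hr => hl r (List.mem_cons_of_mem _ hr)) p hp
    intro r hr
    rcases pv_mem_items_insert d q.1 q.2 r hr with h | h
    · exact hd r h
    · rw [h]; exact hl q (List.mem_cons_self ..)

-- under Pre_, every posting list looked up in the dict is duplicate-free
theorem pv_getD_ofList_nodup (key_dict : List (String × List Int))
    (h : ∀ p ∈ key_dict, p.2.Nodup) (k : String) :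
    ((PySem.Dict.ofList key_dict).getD k []).Nodup := by
  unfold PySem.Dict.getD
  cases hf : (PySem.Dict.ofList key_dict).get? k with
  | none => simp
  | some v =>
    simp only [Option.getD_some]
    unfold PySem.Dict.get? at hf
    obtain ⟨q, hq, hqe⟩ := Option.map_eq_some_iff.mp hf
    have := pv_values_update (C := fun v => v.Nodup) key_dict PySem.Dict.empty
      (by intro p hp; simp [PySem.Dict.empty] at hp) (fun q hq => h q hq) q
      (List.mem_of_find?_eq_some hq)
    rw [hqe] at this; exact this

-- characterization of A's inner loop on a duplicate-free posting list
theorem pv_inner_spec (n : Int) : ∀ (l : List Int), l.Nodup →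
    ∀ (S : PySem.Set Int) (g : PySem.Dict Int Int),
      pvAInner n l (S, g) =
        (l.foldl (fun S idx => if g.getD idx 0 + 1 = n then PySem.Set.add S idx else S) S,
         l.foldl (fun g idx => g.insert idx (g.getD idx 0 + 1)) g) := by
  intro l
  induction l with
  | nil => intro _ S g; rfl
  | cons idx rest ih =>
    intro hnd S g
    obtain ⟨hni, hr⟩ := List.nodup_cons.mp hnd
    have step : pvAInner n (idx :: rest) (S, g) =
        pvAInner n rest
          ((if g.getD idx 0 + 1 = n then PySem.Set.add S idx else S),
           g.insert idx (g.getD idx 0 + 1)) := by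
      simp only [pvAInner, List.foldl_cons, ite_self]
      rw [PySem.Dict.getD_insert]
      simp
    rw [step, ih hr]
    simp only [List.foldl_cons]
    congr 1
    · apply PySem.List.foldl_congr_mem
      intro acc x hx
      have hne : x ≠ idx := fun h => hni (h ▸ hx)
      rw [PySem.Dict.getD_insert]
      simp [hne]

-- running A's outer loop while counts stay strictly below n: no doc is ever added
theorem pv_outer_run (d0 : PySem.Dict String (List Int)) (n : Int)
    (hnd : ∀ k, (d0.getD k []).Nodup) :
    ∀ (ks : List String) (S : PySem.Set Int) (g : PySem.Dict Int Int)
      (d : PySem.Dict String (List Int)),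
      (∀ k, d.contains k = d0.contains k) → (∀ k, d.getD k [] = d0.getD k []) →
      (∀ idx, g.getD idx 0 + (pvCnt d0 ks idx : Int) < n) →
      ∃ g' d', ks.foldl (pvAStep n) (S, g, d) = (S, g', d') ∧
        (∀ idx, g'.getD idx 0 = g.getD idx 0 + (pvCnt d0 ks idx : Int)) ∧
        (∀ k, d'.contains k = d0.contains k) ∧ (∀ k, d'.getD k [] = d0.getD k []) := by
  intro ks
  induction ks with
  | nil =>
    intro S g d hP hL _
    exact ⟨g, d, rfl, by simp [pvCnt], hP, hL⟩
  | cons k rest ih =>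
    intro S g d hP hL hb
    have hcnt : ∀ idx, pvCnt d0 (k :: rest) idx =
        pvCnt d0 rest idx + (if (d0.contains k && decide (idx ∈ d0.getD k [])) = true then 1 else 0) := by
      intro idx; simp [pvCnt, List.countP_cons]
    by_cases hc : d0.contains k = true
    · -- keyword present
      have hstep : (k :: rest).foldl (pvAStep n) (S, g, d) =
          rest.foldl (pvAStep n)
            ((pvAInner n (d.getD k []) (S, g)).1, (pvAInner n (d.getD k []) (S, g)).2,
              d.insert k (d.getD k [])) := by
        simp only [List.foldl_cons, pvAStep, hP k, hc, if_pos]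
        rw [PySem.Dict.getD_insert]
        simp
      rw [hL k] at hstep
      rw [pv_inner_spec n _ (hnd k) S g] at hstep
      have hSid : (d0.getD k []).foldl
          (fun S idx => if g.getD idx 0 + 1 = n then PySem.Set.add S idx else S) S = S := by
        rw [PySem.List.foldl_congr_mem _ _ (fun S _ => S) S ?_, pv_foldl_id]
        intro acc x hx
        have h1 : g.getD x 0 + (pvCnt d0 (k :: rest) x : Int) < n := hb x
        have h2 : (1 : Nat) ≤ pvCnt d0 (k :: rest) x := by
          rw [hcnt x]
          simp [hc, hx]
        have h2' : (1:Int) ≤ (pvCnt d0 (k :: rest) x : Int) := by exact_mod_cast h2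
        have hne : ¬ (g.getD x 0 + 1 = n) := by omega
        simp [hne]
      rw [hSid] at hstep
      set g1 := (d0.getD k []).foldl (fun g idx => g.insert idx (g.getD idx 0 + 1)) g with hg1
      set d1 := d.insert k (d0.getD k []) with hd1
      have hg1v : ∀ idx, g1.getD idx 0 = g.getD idx 0 +
          (if (d0.contains k && decide (idx ∈ d0.getD k [])) = true then (1:Int) else 0) := by
        intro idx
        rw [hg1, PySem.Dict.getD_foldl_insert_add_one]
        by_cases hm : idx ∈ d0.getD k []
        · rw [List.count_eq_one_of_mem (hnd k) hm]; simp [hc, hm]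
        · rw [List.count_eq_zero_of_not_mem hm]; simp [hc, hm]
      have hP1 : ∀ k', d1.contains k' = d0.contains k' := by
        intro k'
        rw [hd1, PySem.Dict.contains_insert]
        by_cases hk : k' = k
        · simp [hk, hc]
        · simp [hk, hP k']
      have hL1 : ∀ k', d1.getD k' [] = d0.getD k' [] := by
        intro k'
        rw [hd1, PySem.Dict.getD_insert]
        by_cases hk : k' = k
        · simp [hk]
        · simp [hk, hL k']
      have hb1 : ∀ idx, g1.getD idx 0 + (pvCnt d0 rest idx : Int) < n := by
        intro idx
        have := hb idx
        rw [hcnt idx] at this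
        rw [hg1v idx]
        push_cast at this ⊢
        split_ifs at this ⊢ <;> omega
      obtain ⟨g', d', he, hg, hP', hL'⟩ := ih S g1 d1 hP1 hL1 hb1
      refine ⟨g', d', by rw [hstep]; exact he, ?_, hP', hL'⟩
      intro idx
      rw [hg idx, hg1v idx, hcnt idx]
      push_cast
      split_ifs <;> omega
    · -- keyword absent
      have hc' : d.contains k = false := by rw [hP k]; simpa using hc
      have hstep : (k :: rest).foldl (pvAStep n) (S, g, d) = rest.foldl (pvAStep n) (S, g, d) := by
        simp [List.foldl_cons, pvAStep, hc']
      rw [hstep]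
      have hb' : ∀ idx, g.getD idx 0 + (pvCnt d0 rest idx : Int) < n := by
        intro idx; have := hb idx; rw [hcnt idx] at this
        have h0 : (0:Int) ≤ (if (d0.contains k && decide (idx ∈ d0.getD k [])) = true then (1:Nat) else 0) := by positivity
        push_cast at this ⊢; omega
      obtain ⟨g', d', he, hg, hP', hL'⟩ := ih S g d hP hL hb'
      refine ⟨g', d', he, ?_, hP', hL'⟩
      intro idx
      rw [hg idx, hcnt idx]
      simp [hc]

-- the add-fold appends exactly the filtered elements when nothing of l is in S yet
theorem pv_foldl_add_filter (P : Int → Prop) [DecidablePred P] :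
    ∀ (l : List Int) (S : PySem.Set Int), l.Nodup → (∀ x ∈ l, x ∉ S) →
      l.foldl (fun S idx => if P idx then PySem.Set.add S idx else S) S
        = S ++ l.filter (fun x => decide (P x)) := by
  intro l
  induction l with
  | nil => intro S _ _; simp
  | cons x rest ih =>
    intro S hnd hS
    obtain ⟨hnx, hr⟩ := List.nodup_cons.mp hnd
    simp only [List.foldl_cons, List.filter_cons]
    by_cases hp : P x
    · rw [if_pos hp, PySem.Set.add_of_not_mem (hS x (List.mem_cons_self ..)),
        ih (S ++ [x]) hr ?_]
      · simp [hp]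
      · intro y hy
        simp only [List.mem_append, List.mem_singleton, not_or]
        exact ⟨hS y (List.mem_cons_of_mem _ hy), fun h => hnx (h ▸ hy)⟩
    · rw [if_neg hp, ih S hr (fun y hy => hS y (List.mem_cons_of_mem _ hy))]
      simp [hp]

-- B's intersection fold is a filter by membership in every posting set
theorem pv_foldl_inter_filter (d0 : PySem.Dict String (List Int)) :
    ∀ (ks : List String) (base : List Int),
      ks.foldl (fun common k => PySem.Set.inter common (PySem.Set.ofList (d0.getD k []))) base
        = base.filter (fun x => ks.all (fun k => (PySem.Set.ofList (d0.getD k [])).contains x)) := by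
  intro ks
  induction ks with
  | nil => intro base; simp
  | cons k rest ih =>
    intro base
    rw [List.foldl_cons, ih, PySem.Set.inter, List.filter_filter]
    apply List.filter_congr
    intro x _
    simp [List.all_cons, Bool.and_comm]

theorem find_words_main (keywords : List String) (key_dict : List (String × List Int))
    (hpre : ∀ p ∈ key_dict, p.2.Nodup) :
    find_words keywords key_dict = find_words_alt keywords key_dict := by
  rcases eq_or_ne keywords [] with hnil | hne
  · subst hnil; rfl
  set d0 := PySem.Dict.ofList key_dict with hd0
  set n : Int := (keywords.length : Int) with hn
  have hnd : ∀ k, (d0.getD k []).Nodup := pv_getD_ofList_nodup key_dict hpre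
  set ks := keywords.dropLast with hks
  set kl := keywords.getLast hne with hkl
  have hsplit : ks ++ [kl] = keywords := List.dropLast_append_getLast hne
  have hlen : ks.length + 1 = keywords.length := by
    have h1 : 0 < keywords.length := List.length_pos_of_ne_nil hne
    rw [hks, List.length_dropLast]; omega
  by_cases hall : ∀ k ∈ keywords, d0.contains k = true
  · -- every keyword present: A = filter of the last posting list = B
    have hklmem : kl ∈ keywords := List.getLast_mem hne
    have hckl : d0.contains kl = true := hall kl hklmem
    have hbound : ∀ idx, (PySem.Dict.empty : PySem.Dict Int Int).getD idx 0
        + (pvCnt d0 ks idx : Int) < n := by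
      intro idx
      have hle : pvCnt d0 ks idx ≤ ks.length := List.countP_le_length
      have : (pvCnt d0 ks idx : Int) ≤ (ks.length : Int) := by exact_mod_cast hle
      have hg0 : (PySem.Dict.empty : PySem.Dict Int Int).getD idx 0 = 0 := rfl
      rw [hg0, hn]
      omega
    obtain ⟨g', d', he, hg, hP', hL'⟩ :=
      pv_outer_run d0 n hnd ks PySem.Set.empty PySem.Dict.empty d0
        (fun k => rfl) (fun k => rfl) hbound
    have hA : find_words keywords key_dict
        = (pvAStep n (PySem.Set.empty, g', d') kl).1 := by
      show (keywords.foldl (pvAStep n) (PySem.Set.empty, PySem.Dict.empty, d0)).1 = _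
      rw [← hsplit, List.foldl_append, he]
      rfl
    have hstep : (pvAStep n (PySem.Set.empty, g', d') kl).1
        = (pvAInner n (d0.getD kl []) (PySem.Set.empty, g')).1 := by
      unfold pvAStep
      rw [hP' kl, hckl, if_pos rfl]
      have : (d'.insert kl (d'.getD kl [])).getD kl [] = d0.getD kl [] := by
        rw [PySem.Dict.getD_insert]; simp [hL' kl]
      simp only [this]
    rw [hA, hstep, pv_inner_spec n _ (hnd kl) PySem.Set.empty g',
        pv_foldl_add_filter (fun idx => g'.getD idx 0 + 1 = n) _ _ (hnd kl) (by simp [PySem.Set.empty])]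
    have hBany : keywords.any (fun k => !(d0.contains k)) = false := by
      simp only [List.any_eq_false]
      intro k hk
      simp [hall k hk]
    have hB : find_words_alt keywords key_dict
        = (d0.getD kl []).filter
            (fun x => ks.all (fun k => (PySem.Set.ofList (d0.getD k [])).contains x)) := by
      show (match keywords.getLast? with
        | none => PySem.Set.empty
        | some last =>
          if keywords.any (fun k => !(d0.contains k)) then PySem.Set.empty
          else keywords.dropLast.foldl
            (fun common k => PySem.Set.inter common (PySem.Set.ofList (d0.getD k [])))
            (PySem.Set.ofList (d0.getD last []))) = _
      rw [List.getLast?_eq_some_getLast hne, hBany]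
      simp only [Bool.false_eq_true, if_false, ← hks, ← hkl,
        pv_foldl_inter_filter d0 ks, PySem.Set.ofList_eq_self_of_nodup _ (hnd kl)]
    rw [hB]
    apply List.filter_congr
    intro x hx
    rw [Bool.eq_iff_iff]
    simp only [decide_eq_true_eq, List.all_eq_true]
    have hcnteq : ∀ k ∈ ks, (d0.contains k && decide (x ∈ d0.getD k [])) = decide (x ∈ d0.getD k []) := by
      intro k hk
      have : k ∈ keywords := by rw [← hsplit]; exact List.mem_append_left _ hk
      simp [hall k this]
    constructor
    · intro hsum k hk
      have heq : (pvCnt d0 ks x : Int) = (ks.length : Int) := by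
        rw [hg x] at hsum
        have hg0 : (PySem.Dict.empty : PySem.Dict Int Int).getD x 0 = 0 := rfl
        rw [hg0, hn] at hsum
        have hle : pvCnt d0 ks x ≤ ks.length := List.countP_le_length
        omega
      have : pvCnt d0 ks x = ks.length := by exact_mod_cast heq
      have hallmem := List.countP_eq_length.mp this k hk
      rw [hcnteq k hk] at hallmem
      simp only [PySem.Set.contains]
      have : x ∈ PySem.Set.ofList (d0.getD k []) := by
        rw [PySem.Set.mem_ofList]
        exact of_decide_eq_true hallmem
      exact List.elem_eq_true_of_mem this
    · intro hmem
      rw [hg x]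
      have hg0 : (PySem.Dict.empty : PySem.Dict Int Int).getD x 0 = 0 := rfl
      rw [hg0, hn]
      have : pvCnt d0 ks x = ks.length := by
        apply List.countP_eq_length.mpr
        intro k hk
        rw [hcnteq k hk]
        have := hmem k hk
        simp only [PySem.Set.contains] at this
        have : x ∈ PySem.Set.ofList (d0.getD k []) := List.mem_of_elem_eq_true this
        rw [PySem.Set.mem_ofList] at this
        simpa using this
      push_cast [this]
      omega
  · -- some keyword absent: both return the empty set
    push Not at hall
    obtain ⟨k0, hk0, hk0c⟩ := hall
    have hbound : ∀ idx, (PySem.Dict.empty : PySem.Dict Int Int).getD idx 0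
        + (pvCnt d0 keywords idx : Int) < n := by
      intro idx
      have hmono : pvCnt d0 keywords idx ≤ keywords.countP (fun k => d0.contains k) := by
        apply List.countP_mono_left
        intro k _ h
        exact (Bool.and_elim_left h)
      have hle : keywords.countP (fun k => d0.contains k) ≤ keywords.length :=
        List.countP_le_length
      have hneq : keywords.countP (fun k => d0.contains k) ≠ keywords.length := by
        intro h
        have := List.countP_eq_length.mp h k0 hk0
        simp [hk0c] at this
      have hg0 : (PySem.Dict.empty : PySem.Dict Int Int).getD idx 0 = 0 := rfl
      rw [hg0, hn]
      have h1 : (pvCnt d0 keywords idx : Int) ≤ (keywords.countP (fun k => d0.contains k) : Int) := by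
        exact_mod_cast hmono
      have h2 : (keywords.countP (fun k => d0.contains k) : Int) < (keywords.length : Int) := by
        exact_mod_cast Nat.lt_of_le_of_ne hle hneq
      omega
    obtain ⟨g', d', he, -, -, -⟩ :=
      pv_outer_run d0 n hnd keywords PySem.Set.empty PySem.Dict.empty d0
        (fun k => rfl) (fun k => rfl) hbound
    have hA : find_words keywords key_dict = PySem.Set.empty := by
      show (keywords.foldl (pvAStep n) (PySem.Set.empty, PySem.Dict.empty, d0)).1 = _
      rw [he]
    have hBany : keywords.any (fun k => !(d0.contains k)) = true := by
      simp only [List.any_eq_true]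
      exact ⟨k0, hk0, by simp [hk0c]⟩
    have hB : find_words_alt keywords key_dict = PySem.Set.empty := by
      show (match keywords.getLast? with
        | none => PySem.Set.empty
        | some last =>
          if keywords.any (fun k => !(d0.contains k)) then PySem.Set.empty
          else keywords.dropLast.foldl
            (fun common k => PySem.Set.inter common (PySem.Set.ofList (d0.getD k [])))
            (PySem.Set.ofList (d0.getD last []))) = _
      rw [List.getLast?_eq_some_getLast hne, hBany]
      simp
    rw [hA, hB]

-- ===== VERDICT (by name: the statement is the Claim_ definition above) =====
theorem find_words_spec : Claim_equal_find_words := by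
  intro keywords key_dict _ hpre
  exact find_words_main keywords key_dict hpre
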